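-- pv_equiv track=rewrite | github.com/maninka123/tennis-tour-dashboard | scripts/wta_scrape_wtatennis.py | _choose_player_image
-- ===== SOURCE A (Python) =====
-- from typing import Dict, List, Optional, Tuple
--
-- def _choose_player_image(urls: List[str]) -> str:
--     if not urls:
--         return ""
--     # Prefer photoresources/torso/headshot and avoid flags
--     preferred = []
--     fallback = []
--     for url in urls:
--         if not url:
--             continue
--         lower = url.lower()
--         if "flag" in lower or "flags" in lower:
--             continue
--         if "photoresources" in lower or "photo-resources" in lower or "torso" in lower or "headshot" in lower:
--             preferred.append(url)
--         else:
--             fallback.append(url)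
--     return preferred[0] if preferred else (fallback[0] if fallback else "")
-- ===== SOURCE B (Python) =====
-- def _choose_player_image(urls):
--     def ok(u):
--         return bool(u) and "flag" not in u.lower()
--
--     keywords = ("photoresources", "photo-resources", "torso", "headshot")
--     preferred = next((u for u in urls if ok(u) and any(k in u.lower() for k in keywords)), None)
--     if preferred is not None:
--         return preferred
--     fallback = next((u for u in urls if ok(u)), None)
--     return fallback if fallback is not None else ""
-- ===== Notes on version B (the rewrite author's own statement) =====
-- stated objective: simpler
-- what changed: Replaces the single pass that builds two accumulator lists with two short-circuiting next() scans over filters (keyworded non-flag URL first, then any non-flag URL), keeping no lists; the redundant 'flags' check (subsumed by 'flag') is dropped.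
import Mathlib
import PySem

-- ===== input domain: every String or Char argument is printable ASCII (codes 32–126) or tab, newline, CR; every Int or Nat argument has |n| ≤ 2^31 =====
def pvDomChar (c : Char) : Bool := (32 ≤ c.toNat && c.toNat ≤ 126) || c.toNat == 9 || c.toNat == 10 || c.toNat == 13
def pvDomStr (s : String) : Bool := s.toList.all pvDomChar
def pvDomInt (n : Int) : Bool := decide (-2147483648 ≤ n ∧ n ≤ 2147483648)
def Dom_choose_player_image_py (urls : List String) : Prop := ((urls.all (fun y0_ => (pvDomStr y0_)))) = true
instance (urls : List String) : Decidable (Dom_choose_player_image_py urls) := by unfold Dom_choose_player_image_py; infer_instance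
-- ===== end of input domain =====

-- B replaces A's single pass that builds two accumulator lists with two short-circuiting find? scans (no lists kept); same-value re-implementation, objective: simpler.
-- ===== PORT A =====
-- literal transliteration of A: one pass building two accumulator lists, then pick.
def pvStepA (acc : List String × List String) (url : String) : List String × List String :=
  if url = "" then acc
  else
    let lower := PySem.Str.lower url
    if PySem.Str.isIn "flag" lower || PySem.Str.isIn "flags" lower then acc
    else if PySem.Str.isIn "photoresources" lower || PySem.Str.isIn "photo-resources" lower
           || PySem.Str.isIn "torso" lower || PySem.Str.isIn "headshot" lower then
      (acc.1 ++ [url], acc.2)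
    else (acc.1, acc.2 ++ [url])

def choose_player_image_py (urls : List String) : String :=
  if urls = [] then ""
  else
    let st := urls.foldl pvStepA ([], [])
    match st.1 with
    | p :: _ => p
    | [] =>
      match st.2 with
      | f :: _ => f
      | [] => ""

-- ===== PORT B =====
-- B: two short-circuiting scans (find?), no accumulator lists.
def pvOk (u : String) : Bool :=
  decide (u ≠ "") && !(PySem.Str.isIn "flag" (PySem.Str.lower u))

def pvKw (u : String) : Bool :=
  let l := PySem.Str.lower u
  PySem.Str.isIn "photoresources" l || PySem.Str.isIn "photo-resources" l
    || PySem.Str.isIn "torso" l || PySem.Str.isIn "headshot" l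

def choose_player_image_py_alt (urls : List String) : String :=
  match urls.find? (fun u => pvOk u && pvKw u) with
  | some p => p
  | none =>
    match urls.find? pvOk with
    | some f => f
    | none => ""

-- ===== PRECONDITION & SPEC =====
def Spec_choose_player_image_py (urls : List String) (out : String) : Prop := out = choose_player_image_py_alt urls
instance (urls : List String) (out : String) : Decidable (Spec_choose_player_image_py urls out) := by unfold Spec_choose_player_image_py; infer_instance

-- ===== CLAIM (what is proved, stated in full; the proofs are below) =====
def Claim_equal_choose_player_image_py : Prop := ∀ (urls : List String), Dom_choose_player_image_py urls → Spec_choose_player_image_py urls (choose_player_image_py urls)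

-- ===== LEMMAS AND PROOFS =====

-- "flags" occurring in l implies "flag" occurring in l.
lemma flags_imp_flag (l : String) (h : PySem.Str.isIn "flags" l = true) :
    PySem.Str.isIn "flag" l = true := by
  rw [PySem.Str.isIn_iff_infix] at h ⊢
  exact List.IsInfix.trans (by decide : "flag".toList <+: "flags".toList).isInfix h

-- one loop step of A, phrased with B's predicates
lemma pvStepA_eq (pre fb : List String) (u : String) :
    pvStepA (pre, fb) u =
      (pre ++ (if pvOk u && pvKw u then [u] else []),
       fb ++ (if pvOk u && !pvKw u then [u] else [])) := by
  unfold pvStepA pvOk pvKw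
  by_cases he : u = ""
  · simp [he]
  · by_cases hf : PySem.Str.isIn "flag" (PySem.Str.lower u) = true
    · simp at hf
      simp [he, hf]
    · have hfs : PySem.Str.isIn "flags" (PySem.Str.lower u) = false := by
        cases hh : PySem.Str.isIn "flags" (PySem.Str.lower u)
        · rfl
        · exact absurd (flags_imp_flag _ hh) hf
      cases hk : (PySem.Str.isIn "photoresources" (PySem.Str.lower u)
          || PySem.Str.isIn "photo-resources" (PySem.Str.lower u)
          || PySem.Str.isIn "torso" (PySem.Str.lower u)
          || PySem.Str.isIn "headshot" (PySem.Str.lower u)) with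
      | true => simp_all
      | false => simp_all

-- the fold accumulates exactly the two filters
lemma fold_eq_filters (urls : List String) (pre fb : List String) :
    urls.foldl pvStepA (pre, fb)
    = (pre ++ urls.filter (fun u => pvOk u && pvKw u),
       fb ++ urls.filter (fun u => pvOk u && !pvKw u)) := by
  induction urls generalizing pre fb with
  | nil => simp
  | cons u us ih =>
    rw [List.foldl_cons, pvStepA_eq, ih]
    cases hp : (pvOk u && pvKw u) <;> cases hq : (pvOk u && !pvKw u) <;>
      simp [List.filter_cons, hp, hq]

-- ===== VERDICT (by name: the statement is the Claim_ definition above) =====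
theorem choose_player_image_py_spec : Claim_equal_choose_player_image_py := by
  intro urls _
  unfold Spec_choose_player_image_py choose_player_image_py choose_player_image_py_alt
  rw [← List.head?_filter, ← List.head?_filter]
  by_cases hnil : urls = []
  · subst hnil; rfl
  · simp only [hnil, if_false, fold_eq_filters, List.nil_append]
    cases hp : urls.filter (fun u => pvOk u && pvKw u) with
    | cons p ps => simp
    | nil =>
      have hsplit : urls.filter pvOk = urls.filter (fun u => pvOk u && !pvKw u) := by
        rw [List.filter_eq_nil_iff] at hp
        apply List.filter_congr
        intro u hu
        cases hok : pvOk u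
        · simp
        · have := hp u hu
          simp [hok] at this
          simp [this]
      rw [hsplit]
      cases urls.filter (fun u => pvOk u && !pvKw u) <;> simp
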